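-- pv_equiv track=rewrite | github.com/realazthat/libcooking | cooking/satutils.py | normalized_clause_comparison
-- ===== SOURCE A (Python) =====
-- def normalized_clause_comparison(x,y):
--     """
--     A comparator that sorts clauses with the following priorities:
--
--     * First by clause-length.
--     * Next, by the lexicographic ordering of the variables (absolute
--         terms) of the clause.
--     * Finally, by the lexicograph ordering of the terms of the clause.
--     """
--     if len(y) < len(x):
--         return -1
--     if len(x) < len(y):
--         return 1
--
--     for i in range(len(x)):
--         if abs(x[i]) < abs(y[i]):
--             return -1
--         if abs(y[i]) < abs(x[i]):
--             return 1
--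
--     if x < y:
--         return -1
--     if y < x:
--         return 1
--     return 0
-- ===== SOURCE B (Python) =====
-- def normalized_clause_comparison(x, y):
--     # Length decides first (longer clause sorts earlier).
--     if len(x) != len(y):
--         return -1 if len(y) < len(x) else 1
--     # Single fused pass: abs difference decides immediately; the first raw
--     # difference is latched in an accumulator and used only if no abs
--     # difference exists (valid because the lists have equal length, so raw
--     # lexicographic order is decided by the first differing position).
--     raw = 0
--     for a, b in zip(x, y):
--         if abs(a) != abs(b):
--             return -1 if abs(a) < abs(b) else 1
--         if raw == 0 and a != b:
--             raw = -1 if a < b else 1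
--     return raw
-- ===== Notes on version B (the rewrite author's own statement) =====
-- stated objective: alternative
-- what changed: Replaces A's staged comparator (length guards, an abs-value early-return index loop, then two whole-list raw `<` comparisons) with a single fused zip pass that returns on the first abs difference and latches the first raw-term difference in an accumulator, so the raw-list comparisons disappear.
import Mathlib
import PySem

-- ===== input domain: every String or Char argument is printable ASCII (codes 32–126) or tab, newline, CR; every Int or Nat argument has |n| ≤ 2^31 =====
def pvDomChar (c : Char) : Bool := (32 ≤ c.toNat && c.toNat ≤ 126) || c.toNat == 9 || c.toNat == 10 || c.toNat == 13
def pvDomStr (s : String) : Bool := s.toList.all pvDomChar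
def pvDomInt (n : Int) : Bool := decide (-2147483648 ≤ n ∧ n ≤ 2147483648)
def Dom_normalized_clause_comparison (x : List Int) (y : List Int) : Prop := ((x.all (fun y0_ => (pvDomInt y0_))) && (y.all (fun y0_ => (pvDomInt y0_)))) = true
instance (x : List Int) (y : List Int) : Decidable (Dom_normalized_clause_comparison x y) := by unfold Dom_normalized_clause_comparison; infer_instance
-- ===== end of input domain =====

-- B fuses A's staged comparator into a single zip pass with a latched first-raw-difference
-- accumulator; objective: alternative decomposition of the same O(n) comparison.

-- ===== PORT A =====
-- A's early-return index loop comparing absolute values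
def pvLoopA : List Int → List Int → Option Int
  | a :: as, b :: bs =>
    if |a| < |b| then some (-1)
    else if |b| < |a| then some 1
    else pvLoopA as bs
  | _, _ => none

-- Python's `<` on lists of ints (lexicographic, proper prefix is smaller)
def pvListLt : List Int → List Int → Bool
  | [], [] => false
  | [], _ :: _ => true
  | _ :: _, [] => false
  | a :: as, b :: bs => if a < b then true else if b < a then false else pvListLt as bs

def normalized_clause_comparison (x : List Int) (y : List Int) : Int :=
  if y.length < x.length then -1
  else if x.length < y.length then 1
  else
    match pvLoopA x y with
    | some r => r
    | none =>
      if pvListLt x y then -1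
      else if pvListLt y x then 1
      else 0

-- ===== PORT B =====
-- Source B's fused loop: `raw` is the accumulator latching the first raw difference
def pvFused : List Int → List Int → Int → Int
  | a :: as, b :: bs, raw =>
    if |a| ≠ |b| then (if |a| < |b| then -1 else 1)
    else pvFused as bs (if raw = 0 ∧ a ≠ b then (if a < b then -1 else 1) else raw)
  | _, _, raw => raw

def normalized_clause_comparison_alt (x : List Int) (y : List Int) : Int :=
  if x.length ≠ y.length then (if y.length < x.length then -1 else 1)
  else pvFused x y 0

-- ===== PRECONDITION & SPEC =====
def Spec_normalized_clause_comparison (x : List Int) (y : List Int) (out : Int) : Prop := out = normalized_clause_comparison_alt x y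
instance (x : List Int) (y : List Int) (out : Int) : Decidable (Spec_normalized_clause_comparison x y out) := by unfold Spec_normalized_clause_comparison; infer_instance

-- ===== CLAIM =====
def Claim_equal_normalized_clause_comparison : Prop := ∀ (x : List Int) (y : List Int), Dom_normalized_clause_comparison x y → Spec_normalized_clause_comparison x y (normalized_clause_comparison x y)

-- ===== LEMMAS AND PROOFS =====

-- the fused loop, on equal-length lists, computes A's tail pipeline with `raw` latched
lemma pvFused_char : ∀ (x y : List Int) (raw : Int), x.length = y.length →
    pvFused x y raw =
      (match pvLoopA x y with
       | some r => r
       | none =>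
         if raw = 0 then
           (if pvListLt x y then -1 else if pvListLt y x then 1 else 0)
         else raw)
  | [], [], raw, _ => by cases h : decide (raw = 0) <;> simp_all [pvFused, pvLoopA, pvListLt]
  | a :: as, b :: bs, raw, h => by
    have hlen : as.length = bs.length := by simpa using h
    simp only [pvFused, pvLoopA, pvListLt]
    rcases lt_trichotomy (|a|) (|b|) with hab | hab | hab
    · simp [ne_of_lt hab, hab]
    · simp only [hab, lt_irrefl, ne_eq, not_true_eq_false, if_false]
      rw [pvFused_char as bs _ hlen]
      rcases hl : pvLoopA as bs with _ | r
      · rcases lt_trichotomy a b with hr | hr | hr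
        · by_cases h0 : raw = 0 <;>
            simp [h0, ne_of_lt hr, hr]
        · subst hr
          by_cases h0 : raw = 0 <;> simp [h0]
        · by_cases h0 : raw = 0 <;>
            simp [h0, (ne_of_lt hr).symm, hr, not_lt.mpr hr.le]
      · simp
    · simp [(ne_of_lt hab).symm, not_lt.mpr hab.le, hab]

-- ===== VERDICT =====
theorem normalized_clause_comparison_spec : Claim_equal_normalized_clause_comparison := by
  intro x y _
  unfold Spec_normalized_clause_comparison normalized_clause_comparison normalized_clause_comparison_alt
  rcases lt_trichotomy x.length y.length with hlt | heq | hgt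
  · simp [not_lt.mpr hlt.le, hlt, Nat.ne_of_lt hlt]
  · simp only [heq, lt_irrefl, if_false, ne_eq, not_true_eq_false]
    rw [pvFused_char x y 0 heq]
    rcases pvLoopA x y with _ | r <;> simp
  · simp [hgt, Nat.ne_of_gt hgt]
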